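-- pv_equiv track=rewrite | github.com/rogue0137/practice | interview_cake/2024/August5toAugust12/inflight_entertainment.py | can_two_movies_fill_flight
-- ===== SOURCE A (Python) =====
-- def can_two_movies_fill_flight(movie_lengths, flight_length):
--     movie_lengths_set = set(movie_lengths)
--
--     for first_movie_length in movie_lengths:
--         # Calculate the range for the second movie length considering the tolerance
--         # 20 min under exact time
--         under_twenty = flight_length - first_movie_length - 20
--         min_target_length = max(0, under_twenty )
--         # 20 min over exact time
--         max_target_length = flight_length - first_movie_length + 20
--
--         # Check if there exists a movie within the acceptable range
--         for potential_second_movie_length in range(min_target_length, max_target_length + 1):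
--             if potential_second_movie_length != first_movie_length and potential_second_movie_length in movie_lengths_set:
--                 return True
--
--     return False
-- ===== SOURCE B (Python) =====
-- def can_two_movies_fill_flight(movie_lengths, flight_length):
--     # Simpler: direct pairwise comparison over the distinct lengths instead of
--     # probing a hash set over the integer window range(max(0, rem-20), rem+21).
--     distinct = set(movie_lengths)
--     for first in distinct:
--         lo = max(0, flight_length - first - 20)
--         hi = flight_length - first + 20
--         for second in distinct:
--             if second != first and lo <= second <= hi:
--                 return True
--     return False
-- ===== Notes on version B (the rewrite author's own statement) =====
-- stated objective: simpler
-- what changed: Replaces the set-plus-integer-window scan (probing every value in range(max(0,rem-20), rem+21) against a hash set) with a plain pairwise double loop over the distinct movie lengths, comparing each second length against the window bounds directly.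
import Mathlib
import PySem

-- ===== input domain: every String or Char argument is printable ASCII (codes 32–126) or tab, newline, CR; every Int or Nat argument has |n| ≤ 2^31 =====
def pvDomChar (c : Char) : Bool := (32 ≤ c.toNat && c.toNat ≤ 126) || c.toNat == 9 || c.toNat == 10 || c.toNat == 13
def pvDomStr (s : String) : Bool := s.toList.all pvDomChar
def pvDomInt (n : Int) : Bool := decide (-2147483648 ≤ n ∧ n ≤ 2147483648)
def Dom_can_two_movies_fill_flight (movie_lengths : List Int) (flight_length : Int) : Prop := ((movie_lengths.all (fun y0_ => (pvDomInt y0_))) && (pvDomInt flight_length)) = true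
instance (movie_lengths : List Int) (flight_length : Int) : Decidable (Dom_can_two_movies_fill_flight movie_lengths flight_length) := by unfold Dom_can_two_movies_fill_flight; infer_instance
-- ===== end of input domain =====

-- B replaces A's set-plus-integer-window scan with a pairwise double loop over the
-- distinct movie lengths (objective: simpler); proved to return the same Bool everywhere.

-- ===== PORT A =====
-- Port of A: set(movie_lengths), then for each first length scan the integer window
-- range(max(0, fl-first-20), fl-first+21) for a different value present in the set.
def can_two_movies_fill_flight (movie_lengths : List Int) (flight_length : Int) : Bool :=
  let movie_lengths_set : PySem.Set Int := PySem.Set.ofList movie_lengths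
  movie_lengths.any (fun first_movie_length =>
    let under_twenty := flight_length - first_movie_length - 20
    let min_target_length := max 0 under_twenty
    let max_target_length := flight_length - first_movie_length + 20
    (PySem.List.pyRange min_target_length (max_target_length + 1) 1).any
      (fun potential_second_movie_length =>
        potential_second_movie_length != first_movie_length &&
          PySem.Set.contains movie_lengths_set potential_second_movie_length))

-- ===== PORT B =====
-- Port of B: pairwise double loop over the distinct lengths, comparing the second
-- length to the window bounds directly.
def can_two_movies_fill_flight_alt (movie_lengths : List Int) (flight_length : Int) : Bool :=
  let distinct : PySem.Set Int := PySem.Set.ofList movie_lengths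
  distinct.any (fun first =>
    let lo := max 0 (flight_length - first - 20)
    let hi := flight_length - first + 20
    distinct.any (fun second => second != first && (lo ≤ second && second ≤ hi)))

-- ===== PRECONDITION & SPEC =====
def Spec_can_two_movies_fill_flight (movie_lengths : List Int) (flight_length : Int) (out : Bool) : Prop := out = can_two_movies_fill_flight_alt movie_lengths flight_length
instance (movie_lengths : List Int) (flight_length : Int) (out : Bool) : Decidable (Spec_can_two_movies_fill_flight movie_lengths flight_length out) := by unfold Spec_can_two_movies_fill_flight; infer_instance

-- ===== CLAIM (what is proved, stated in full; the proofs are below) =====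
def Claim_equal_can_two_movies_fill_flight : Prop := ∀ (movie_lengths : List Int) (flight_length : Int), Dom_can_two_movies_fill_flight movie_lengths flight_length → Spec_can_two_movies_fill_flight movie_lengths flight_length (can_two_movies_fill_flight movie_lengths flight_length)

-- ===== LEMMAS AND PROOFS =====

-- ===== VERDICT (by name: the statement is the Claim_ definition above) =====
-- For one fixed first length, scanning the window for a member of the set
-- finds something iff some list element (≠ first) lies in the window.
theorem pv_inner_eq (ml : List Int) (first lo hi : Int) :
    ((PySem.List.pyRange lo (hi + 1) 1).any
        (fun p => p != first && PySem.Set.contains (PySem.Set.ofList ml) p))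
      = ml.any (fun s => s != first && (lo ≤ s && s ≤ hi)) := by
  apply Bool.eq_iff_iff.mpr
  simp only [List.any_eq_true, Bool.and_eq_true, bne_iff_ne, ne_eq, decide_eq_true_eq,
    PySem.List.mem_pyRange_one, PySem.Set.contains_iff, PySem.Set.mem_ofList]
  constructor
  · rintro ⟨p, ⟨hlo, hhi⟩, hne, hmem⟩
    exact ⟨p, hmem, hne, hlo, by omega⟩
  · rintro ⟨s, hmem, hne, hlo, hhi⟩
    exact ⟨s, ⟨hlo, by omega⟩, hne, hmem⟩

-- any over set(ml) = any over ml (membership is the same).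
theorem pv_any_ofList (ml : List Int) (f : Int → Bool) :
    (PySem.Set.ofList ml).any f = ml.any f := by
  apply Bool.eq_iff_iff.mpr
  simp only [List.any_eq_true, PySem.Set.mem_ofList]

theorem can_two_movies_fill_flight_spec : Claim_equal_can_two_movies_fill_flight := by
  intro ml fl _
  unfold Spec_can_two_movies_fill_flight
  simp only [can_two_movies_fill_flight, can_two_movies_fill_flight_alt]
  rw [pv_any_ofList]
  refine congrArg ml.any (funext fun first => ?_)
  rw [pv_any_ofList]
  exact pv_inner_eq ml first (max 0 (fl - first - 20)) (fl - first + 20)
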